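-- pv_equiv track=rewrite | github.com/HITOfficial/College | ASD/Kolokwia/sorts_exercises/zad7.py | beautiful_numbers
-- ===== SOURCE A (Python) =====
-- def digits(n):
--     Arr = [0] * 10
--     while n>0:
--         Arr[n%10] += 1
--         n //=10
--     return Arr
--
-- def beautiful_numbers(n):
--     Arr = digits(n)
--     single = 0
--     duplicates= 0
--     for el in Arr:
--         if el == 1:
--             single += 1
--         if el >= 2:
--             duplicates += 1
--     return (single*10)+duplicates
-- ===== SOURCE B (Python) =====
-- def beautiful_numbers(n):
--     # stage 1: extract decimal digits (positive n only, so n<=0 gives [])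
--     ds = []
--     while n > 0:
--         ds.append(n % 10)
--         n //= 10
--     # stage 2: sort so equal digits are adjacent
--     ds.sort()
--     # stage 3: walk consecutive equal runs
--     def runs(l):
--         if not l:
--             return (0, 0)
--         x = l[0]
--         i = 1
--         while i < len(l) and l[i] == x:
--             i += 1
--         s, d = runs(l[i:])
--         if i == 1:
--             return (s + 1, d)
--         return (s, d + 1)
--     s, d = runs(ds)
--     return s * 10 + d
-- ===== Notes on version B (the rewrite author's own statement) =====
-- stated objective: alternative
-- what changed: Replaced A's fixed digit-indexed frequency array (filled by the digit loop, then scanned for counts equal to one and at least two) with a sort-then-group-runs design: extract the digits into a list, sort it, and recursively walk consecutive equal runs, classifying each run by its length; no frequency array and no per-digit-value scan.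
import Mathlib
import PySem

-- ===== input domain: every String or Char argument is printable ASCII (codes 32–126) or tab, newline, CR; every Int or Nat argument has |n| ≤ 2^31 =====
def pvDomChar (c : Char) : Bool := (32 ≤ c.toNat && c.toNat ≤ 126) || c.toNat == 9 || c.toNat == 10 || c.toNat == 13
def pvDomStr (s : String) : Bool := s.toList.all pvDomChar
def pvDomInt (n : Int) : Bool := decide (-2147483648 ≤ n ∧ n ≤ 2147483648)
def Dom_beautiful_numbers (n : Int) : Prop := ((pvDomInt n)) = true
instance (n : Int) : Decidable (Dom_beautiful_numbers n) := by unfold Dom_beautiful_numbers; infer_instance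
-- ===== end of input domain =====

-- B replaces A's fixed 10-slot frequency array with sort-then-group-runs over the extracted
-- digit list; alternative decomposition, similar cost.

-- ===== PORT A =====
-- while n>0: Arr[n%10] += 1; n //= 10
def pvDigitsLoop (n : Int) (arr : List Int) : List Int :=
  if h : 0 < n then
    pvDigitsLoop (PySem.Int.floordiv n 10)
      (PySem.List.pySetD arr (PySem.Int.mod n 10)
        (PySem.List.pyGetD arr (PySem.Int.mod n 10) 0 + 1))
  else arr
termination_by n.toNat
decreasing_by
  rw [PySem.Int.floordiv_eq_ediv_of_pos (by norm_num : (0:Int) < 10)]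
  omega

def pvDigits (n : Int) : List Int := pvDigitsLoop n (List.replicate 10 0)

def beautiful_numbers (n : Int) : Int :=
  let arr := pvDigits n
  let p := arr.foldl
    (fun (acc : Int × Int) el =>
      (if el = 1 then acc.1 + 1 else acc.1, if 2 ≤ el then acc.2 + 1 else acc.2))
    (0, 0)
  p.1 * 10 + p.2

-- ===== PORT B =====
-- while n>0: ds.append(n%10); n //= 10   (digit list, low digit first)
def pvDigList (n : Int) : List Int :=
  if _h : 0 < n then PySem.Int.mod n 10 :: pvDigList (PySem.Int.floordiv n 10) else []
termination_by n.toNat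
decreasing_by
  rw [PySem.Int.floordiv_eq_ediv_of_pos (by norm_num : (0:Int) < 10)]
  omega

-- def runs(l): the inner 'while i < len(l) and l[i] == x: i += 1' computes the run of the
-- head x, i.e. i - 1 = length of takeWhile (== x) of the tail, and l[i:] = its dropWhile.
def pvRuns (l : List Int) : Int × Int :=
  match l with
  | [] => (0, 0)
  | x :: xs =>
    let t := xs.takeWhile (fun y => y == x)
    let p := pvRuns (xs.dropWhile (fun y => y == x))
    if t.length = 0 then (p.1 + 1, p.2) else (p.1, p.2 + 1)
termination_by l.length
decreasing_by
  have := (List.dropWhile_sublist (l := xs) (p := fun y => y == x)).length_le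
  simp
  omega

def beautiful_numbers_alt (n : Int) : Int :=
  let ds := PySem.List.sorted (pvDigList n) (fun x => x) false
  let p := pvRuns ds
  p.1 * 10 + p.2

-- ===== PRECONDITION & SPEC =====
def Spec_beautiful_numbers (n : Int) (out : Int) : Prop := out = beautiful_numbers_alt n
instance (n : Int) (out : Int) : Decidable (Spec_beautiful_numbers n out) := by unfold Spec_beautiful_numbers; infer_instance

-- ===== CLAIM (what is proved, stated in full; the proofs are below) =====
def Claim_equal_beautiful_numbers : Prop := ∀ (n : Int), Dom_beautiful_numbers n → Spec_beautiful_numbers n (beautiful_numbers n)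

-- ===== LEMMAS AND PROOFS =====

def pvRangeTen : List Int := [0, 1, 2, 3, 4, 5, 6, 7, 8, 9]

lemma pvDigList_mem (n : Int) : ∀ x ∈ pvDigList n, 0 ≤ x ∧ x < 10 := by
  fun_induction pvDigList n with
  | case1 n h ih =>
    intro x hx
    rcases List.mem_cons.mp hx with rfl | hx
    · exact ⟨PySem.Int.mod_nonneg _ (by norm_num), PySem.Int.mod_lt _ (by norm_num)⟩
    · exact ih x hx
  | case2 n h => simp

lemma pvDigitsLoop_base (n : Int) (h : ¬ 0 < n) (arr : List Int) (hlen : arr.length = 10) :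
    pvDigitsLoop n arr = pvRangeTen.map
      (fun d => PySem.List.pyGetD arr d 0 + ((pvDigList n).count d : Int)) := by
  rw [pvDigitsLoop, dif_neg h, pvDigList, dif_neg h]
  simp only [List.count_nil, Nat.cast_zero, add_zero]
  have h10 : PySem.List.len arr = (10 : Int) := by simp [PySem.List.len, hlen]
  have hmap := PySem.List.map_pyGetD_pyRange_zero arr (0 : Int)
  rw [h10, show PySem.List.pyRange 0 10 = pvRangeTen from by decide] at hmap
  exact hmap.symm

lemma pvDigitsLoop_char (fuel : Nat) : ∀ (n : Int), n.toNat ≤ fuel →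
    ∀ (arr : List Int), arr.length = 10 →
    pvDigitsLoop n arr = pvRangeTen.map
      (fun d => PySem.List.pyGetD arr d 0 + ((pvDigList n).count d : Int)) := by
  induction fuel with
  | zero =>
    intro n hn arr hlen
    exact pvDigitsLoop_base n (by omega) arr hlen
  | succ m ih =>
    intro n hn arr hlen
    by_cases h : 0 < n
    · rw [pvDigitsLoop, dif_pos h, pvDigList, dif_pos h]
      have hknn : 0 ≤ PySem.Int.mod n 10 := PySem.Int.mod_nonneg _ (by norm_num)
      have hklt : PySem.Int.mod n 10 < 10 := PySem.Int.mod_lt _ (by norm_num)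
      have hrec : (PySem.Int.floordiv n 10).toNat ≤ m := by
        rw [PySem.Int.floordiv_eq_ediv_of_pos (by norm_num : (0:Int) < 10)]
        omega
      rw [ih _ hrec _ (by rw [PySem.List.length_pySetD]; exact hlen)]
      apply List.map_congr_left
      intro d hd
      have hdb : 0 ≤ d ∧ d < 10 := by
        simp [pvRangeTen] at hd
        omega
      obtain ⟨md, rfl⟩ : ∃ md : Nat, d = (md : Int) := ⟨d.toNat, by omega⟩
      obtain ⟨k, hke⟩ : ∃ k : Nat, PySem.Int.mod n 10 = (k : Int) :=
        ⟨(PySem.Int.mod n 10).toNat, by omega⟩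
      rw [hke, PySem.List.pyGetD_pySetD_natCast arr k md _ _ (by omega), List.count_cons]
      by_cases hdk : md = k
      · subst hdk
        simp
        omega
      · have hne : ¬ ((md : Int) = (k : Int)) := by exact_mod_cast hdk
        have hkm : ¬ k = md := by omega
        simp [hdk, hkm]
    · exact pvDigitsLoop_base n h arr hlen

lemma pvFoldA (l : List Int) : ∀ (s d : Int),
    l.foldl (fun (acc : Int × Int) el =>
      (if el = 1 then acc.1 + 1 else acc.1, if 2 ≤ el then acc.2 + 1 else acc.2)) (s, d)
    = (s + (l.countP (fun el => el == 1) : Int), d + (l.countP (fun el => decide (2 ≤ el)) : Int)) := by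
  induction l with
  | nil => intro s d; simp
  | cons x xs ih =>
    intro s d
    simp only [List.foldl_cons, List.countP_cons]
    rw [ih]
    by_cases h1 : x = (1 : Int) <;> by_cases h2 : (2 : Int) ≤ x <;>
      simp [h1, h2, Prod.ext_iff] <;> omega

-- countP over a Nodup list when two predicates agree except possibly at one member x
lemma pvCountP_update (l : List Int) (hnd : l.Nodup) (x : Int) (p q : Int → Bool)
    (hagree : ∀ y ∈ l, y ≠ x → p y = q y) :
    l.countP p + (if q x ∧ x ∈ l then 1 else 0)
      = l.countP q + (if p x ∧ x ∈ l then 1 else 0) := by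
  induction l with
  | nil => simp
  | cons a as ih =>
    have hnda := (List.nodup_cons.mp hnd).2
    by_cases hax : a = x
    · subst hax
      have hnotmem := (List.nodup_cons.mp hnd).1
      have heq : as.countP p = as.countP q :=
        List.countP_congr (fun y hy => by
          rw [hagree y (List.mem_cons_of_mem _ hy)
            (fun hyx => hnotmem (hyx ▸ hy))])
      simp only [List.countP_cons, List.mem_cons, heq]
      by_cases hp : p a <;> by_cases hq : q a <;> simp [hp, hq]
    · have ih' := ih hnda (fun y hy => hagree y (List.mem_cons_of_mem _ hy))
      have hpq : p a = q a := hagree a (List.mem_cons_self) hax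
      simp only [List.countP_cons, List.mem_cons]
      have hxne : ¬ x = a := fun h => hax h.symm
      by_cases hm : x ∈ as <;> by_cases hp : p x <;> by_cases hq : q x <;>
        simp [hm, hp, hq, hxne, hpq] at ih' ⊢ <;> omega

-- facts about the head run of a sorted list: the dropWhile part stays sorted,
-- contains no further copy of x, and the counts decompose accordingly
lemma pvRunFacts (x : Int) (xs : List Int) (hsort : (x :: xs).Pairwise (· ≤ ·)) :
    (xs.dropWhile (fun y => y == x)).Pairwise (· ≤ ·) ∧
    (xs.dropWhile (fun y => y == x)).count x = 0 ∧
    (x :: xs).count x = (xs.takeWhile (fun y => y == x)).length + 1 ∧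
    (∀ d, d ≠ x → (x :: xs).count d = (xs.dropWhile (fun y => y == x)).count d) := by
  have hsx : ∀ y ∈ xs, x ≤ y := fun y hy => (List.pairwise_cons.mp hsort).1 y hy
  have hsxs := (List.pairwise_cons.mp hsort).2
  have hrsort : (xs.dropWhile (fun y => y == x)).Pairwise (· ≤ ·) :=
    hsxs.sublist (List.dropWhile_sublist _)
  have htall : ∀ y ∈ xs.takeWhile (fun y => y == x), y = x := fun y hy =>
    beq_iff_eq.mp (List.mem_takeWhile_imp (p := fun y => y == x) (l := xs) hy)
  have hsplit : xs.takeWhile (fun y => y == x) ++ xs.dropWhile (fun y => y == x) = xs :=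
    List.takeWhile_append_dropWhile
  have hxnr : x ∉ xs.dropWhile (fun y => y == x) := by
    cases hr : xs.dropWhile (fun y => y == x) with
    | nil => simp
    | cons z zs =>
      have hhead := List.head?_dropWhile_not (fun y => y == x) xs
      rw [hr] at hhead
      have hzx : z ≠ x := by simpa using hhead
      have hzmem : z ∈ xs := (List.dropWhile_sublist _).mem (hr ▸ List.mem_cons_self)
      have hxz : x < z := lt_of_le_of_ne (hsx z hzmem) (Ne.symm hzx)
      rw [hr] at hrsort
      intro hmem
      rcases List.mem_cons.mp hmem with rfl | hmem
      · exact hzx rfl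
      · exact absurd ((List.pairwise_cons.mp hrsort).1 x hmem) (not_le.mpr hxz)
  have hcr0 : (xs.dropWhile (fun y => y == x)).count x = 0 := List.count_eq_zero.mpr hxnr
  refine ⟨hrsort, hcr0, ?_, ?_⟩
  · have h0 : List.count x xs = (xs.takeWhile (fun y => y == x)).length := by
      conv_lhs => rw [← hsplit]
      rw [List.count_append, hcr0,
        List.count_eq_length.mpr (fun y hy => (htall y hy).symm), Nat.add_zero]
    rw [List.count_cons_self, h0]
  · intro d hd
    have h0 : List.count d xs = List.count d (xs.dropWhile (fun y => y == x)) := by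
      conv_lhs => rw [← hsplit]
      rw [List.count_append,
        List.count_eq_zero.mpr (fun h => hd (htall d h)), Nat.zero_add]
    rw [List.count_cons_of_ne (Ne.symm hd), h0]

lemma pvRuns_char (l : List Int) (hsort : l.Pairwise (· ≤ ·))
    (hmem : ∀ y ∈ l, 0 ≤ y ∧ y < 10) :
    pvRuns l = ((pvRangeTen.countP (fun d => l.count d == 1) : Int),
                (pvRangeTen.countP (fun d => decide (2 ≤ l.count d)) : Int)) := by
  have hndR : pvRangeTen.Nodup := by decide
  fun_induction pvRuns l with
  | case1 => simp
  | case2 x xs t p ht ih =>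
    obtain ⟨hrsort, hcr0, hcx, hco⟩ := pvRunFacts x xs hsort
    have hxR : x ∈ pvRangeTen := by
      have := hmem x List.mem_cons_self
      simp [pvRangeTen]
      omega
    have hrmem : ∀ y ∈ xs.dropWhile (fun y => y == x), 0 ≤ y ∧ y < 10 := fun y hy =>
      hmem y (List.mem_cons_of_mem _ ((List.dropWhile_sublist _).mem hy))
    have hres := ih hrsort hrmem
    have h1 := pvCountP_update pvRangeTen hndR x
      (fun d => (x :: xs).count d == 1)
      (fun d => (xs.dropWhile (fun y => y == x)).count d == 1)
      (fun y _ hy => by simp only [hco y hy])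
    have h2 := pvCountP_update pvRangeTen hndR x
      (fun d => decide (2 ≤ (x :: xs).count d))
      (fun d => decide (2 ≤ (xs.dropWhile (fun y => y == x)).count d))
      (fun y _ hy => by simp only [hco y hy])
    rw [ht] at hcx
    simp [hcr0, hcx, hxR] at h1 h2
    show (p.1 + 1, p.2) = _
    rw [show p = pvRuns (xs.dropWhile (fun y => y == x)) from rfl, hres, Prod.mk.injEq]
    refine ⟨?_, ?_⟩ <;> simp <;> omega
  | case3 x xs t p ht ih =>
    obtain ⟨hrsort, hcr0, hcx, hco⟩ := pvRunFacts x xs hsort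
    have hxR : x ∈ pvRangeTen := by
      have := hmem x List.mem_cons_self
      simp [pvRangeTen]
      omega
    have hrmem : ∀ y ∈ xs.dropWhile (fun y => y == x), 0 ≤ y ∧ y < 10 := fun y hy =>
      hmem y (List.mem_cons_of_mem _ ((List.dropWhile_sublist _).mem hy))
    have hres := ih hrsort hrmem
    have h1 := pvCountP_update pvRangeTen hndR x
      (fun d => (x :: xs).count d == 1)
      (fun d => (xs.dropWhile (fun y => y == x)).count d == 1)
      (fun y _ hy => by simp only [hco y hy])
    have h2 := pvCountP_update pvRangeTen hndR x
      (fun d => decide (2 ≤ (x :: xs).count d))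
      (fun d => decide (2 ≤ (xs.dropWhile (fun y => y == x)).count d))
      (fun y _ hy => by simp only [hco y hy])
    have hC : List.count x xs = (xs.takeWhile (fun y => y == x)).length := by
      have h := hcx
      rw [List.count_cons_self] at h
      omega
    have hc0 : List.count x xs ≠ 0 := by
      rw [hC]
      exact ht
    have hmemx : x ∈ xs := List.count_pos_iff.mp (Nat.pos_of_ne_zero hc0)
    simp [hcr0, hxR, hc0, hmemx] at h1 h2
    show (p.1, p.2 + 1) = _
    rw [show p = pvRuns (xs.dropWhile (fun y => y == x)) from rfl, hres, Prod.mk.injEq]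
    refine ⟨?_, ?_⟩ <;> simp <;> omega

theorem pv_main (n : Int) : beautiful_numbers n = beautiful_numbers_alt n := by
  have hdig := pvDigList_mem n
  -- A's side: countP over the per-digit count vector
  have harr : pvDigits n = pvRangeTen.map (fun d => ((pvDigList n).count d : Int)) := by
    unfold pvDigits
    rw [pvDigitsLoop_char n.toNat n le_rfl _ (by simp)]
    apply List.map_congr_left
    intro d hd
    simp [pvRangeTen] at hd
    rcases hd with rfl | rfl | rfl | rfl | rfl | rfl | rfl | rfl | rfl | rfl <;>
      simp [PySem.List.pyGetD_ofNat']
  have hA : beautiful_numbers n =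
      (pvRangeTen.countP (fun d => ((pvDigList n).count d : Int) == 1) : Int) * 10
      + (pvRangeTen.countP (fun d => decide (2 ≤ ((pvDigList n).count d : Int))) : Int) := by
    unfold beautiful_numbers
    simp only [harr, pvFoldA, List.countP_map, Function.comp_def, zero_add]
  -- B's side: sort, then group runs
  set s := PySem.List.sorted (pvDigList n) (fun x => x) false with hs
  have hperm : s.Perm (pvDigList n) := PySem.List.sorted_perm _ _ _
  have hsort : s.Pairwise (· ≤ ·) := PySem.List.sorted_pairwise _ _
  have hsmem : ∀ y ∈ s, 0 ≤ y ∧ y < 10 := fun y hy => hdig y (hperm.mem_iff.mp hy)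
  have hB : beautiful_numbers_alt n =
      ((pvRangeTen.countP (fun d => s.count d == 1) : Int)) * 10
      + ((pvRangeTen.countP (fun d => decide (2 ≤ s.count d)) : Int)) := by
    show (pvRuns s).1 * 10 + (pvRuns s).2 = _
    rw [pvRuns_char s hsort hsmem]
  rw [hA, hB]
  have hcnt : ∀ d, s.count d = (pvDigList n).count d := fun d => hperm.count_eq d
  have e1 : pvRangeTen.countP (fun d => ((pvDigList n).count d : Int) == 1)
      = pvRangeTen.countP (fun d => s.count d == 1) := by
    apply List.countP_congr
    intro y _
    rw [hcnt y]
    simp only [beq_iff_eq]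
    constructor <;> intro h <;> [exact_mod_cast h; exact_mod_cast h]
  have e2 : pvRangeTen.countP (fun d => decide (2 ≤ ((pvDigList n).count d : Int)))
      = pvRangeTen.countP (fun d => decide (2 ≤ s.count d)) := by
    apply List.countP_congr
    intro y _
    rw [hcnt y]
    simp only [decide_eq_true_eq]
    constructor <;> intro h <;> [exact_mod_cast h; exact_mod_cast h]
  rw [e1, e2]

-- ===== VERDICT (by name: the statement is the Claim_ definition above) =====
theorem beautiful_numbers_spec : Claim_equal_beautiful_numbers := by
  intro n _
  exact pv_main n
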